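-- pv_equiv track=rewrite | github.com/pro465/research | strat.py | e3
-- ===== SOURCE A (Python) =====
-- def to_list(num, base, l):
--     res=[]
--     for _ in range(l):
--         res.append(num%base)
--         num//=base
--     return res[::-1]
--
-- def max_prefix(a, b):
--     for i in range(len(a), -1, -1):
--         if a[:i]==b[-i:]: return i
--     return 0
--
-- def e3(a, b, base, l, n):
--     lookup=[[[None]*base for _ in range(l+1)] for _ in range(2)]
--
--     a=to_list(a, base, l)
--     b=to_list(b, base, l)
--
--     for i in range(2):
--         for j in range(l+1):
--             res=(a, b)[i][:j]+[0]
--             for k in range(base):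
--                 res[-1]=k
--                 a_match=max_prefix(a, res)
--                 b_match=max_prefix(b, res)
--                 lookup[i][j][k] = (1, b_match) if b_match > a_match else (0, a_match)
--
--     prev=[[[0]*(2*n+1) for _ in range(l+1)] for _ in range(2)]
--     curr=[[[0]*(2*n+1) for _ in range(l+1)] for _ in range(2)]
--     for i in range(2):
--         for j in range(l+1):
--             curr[i][j][n]=1
--
--     for _ in range(1, n+1):
--         curr, prev = prev, curr
--
--         for i in range(2):
--             for j in range(l+1):
--                 curr[i][j] = [0]*(2*n+1)
--                 for b in range(base):
--                     i_, j_ = lookup[i][j][b]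
--                     o=0
--                     if j_ == l: o=[-1, 1][i_]
--
--                     for s in range(max(-n, -n-o), min(n, n-o)+1):
--                         curr[i][j][s+n]+=prev[i_][j_][s+n+o]
--
--     return sum(curr[0][0][:n]),curr[0][0][n],sum(curr[0][0][n+1:])
-- ===== SOURCE B (Python) =====
-- def to_list(num, base, l):
--     res=[]
--     for _ in range(l):
--         res.append(num%base)
--         num//=base
--     return res[::-1]
--
-- def max_prefix(a, b):
--     for i in range(len(a), -1, -1):
--         if a[:i]==b[-i:]: return i
--     return 0
--
-- def e3(a, b, base, l, n):
--     pa = to_list(a, base, l)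
--     pb = to_list(b, base, l)
--     pats = (pa, pb)
--
--     def step(i, j, k):
--         s = pats[i][:j] + [k]
--         am = max_prefix(pa, s)
--         bm = max_prefix(pb, s)
--         return (1, bm) if bm > am else (0, am)
--
--     trans = [[[step(i, j, k) for k in range(base)] for j in range(l + 1)] for i in range(2)]
--
--     dist = {(0, 0, 0): 1}
--     for _ in range(n):
--         new = {}
--         for (i, j, d), c in dist.items():
--             for k in range(base):
--                 i2, j2 = trans[i][j][k]
--                 o = (1 if i2 else -1) if j2 == l else 0
--                 key = (i2, j2, d + o)
--                 new[key] = new.get(key, 0) + c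
--         dist = new
--
--     pos = sum(c for (_, _, d), c in dist.items() if d > 0)
--     zero = sum(c for (_, _, d), c in dist.items() if d == 0)
--     neg = sum(c for (_, _, d), c in dist.items() if d < 0)
--     return pos, zero, neg
-- ===== Notes on version B (the rewrite author's own statement) =====
-- stated objective: faster
-- what changed: A runs a backward value-iteration DP storing a dense (2n+1)-vector for every automaton state and rescanning all of them each of the n steps; B runs the automaton forward from the single start state, keeping one sparse dict from (state, displacement) to path count (only cells actually reachable after t steps exist), and buckets the final displacement distribution by sign; intended as faster (measured 6.4x at the largest size where both finished), same asymptotic class.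
-- outside the precondition, e.g. on e3(5, 7, 10, 2, -1): A raises IndexError, B returns (0, 1, 0); on e3(5, 7, 10, -1, 1): A raises IndexError, B raises IndexError; on e3(5, 7, 0, 2, 1): A raises ZeroDivisionError, B raises ZeroDivisionError
import Mathlib
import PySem

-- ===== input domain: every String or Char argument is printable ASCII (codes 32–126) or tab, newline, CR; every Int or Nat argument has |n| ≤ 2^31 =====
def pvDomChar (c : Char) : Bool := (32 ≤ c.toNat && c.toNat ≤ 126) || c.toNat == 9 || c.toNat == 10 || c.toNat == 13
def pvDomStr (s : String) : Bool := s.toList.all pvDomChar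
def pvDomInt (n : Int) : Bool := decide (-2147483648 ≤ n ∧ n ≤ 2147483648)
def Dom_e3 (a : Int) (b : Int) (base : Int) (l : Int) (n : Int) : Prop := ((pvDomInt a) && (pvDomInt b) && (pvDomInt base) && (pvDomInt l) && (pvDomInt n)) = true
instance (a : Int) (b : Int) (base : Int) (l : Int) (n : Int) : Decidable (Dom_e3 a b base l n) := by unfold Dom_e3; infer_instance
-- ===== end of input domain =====

-- B replaces A's backward dense DP (a (2n+1)-array per automaton state, all rescanned each step) by a
-- forward sparse DP over one dict keyed by (state, displacement); intended as faster (measured 6.4x at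
-- the largest size where both programs finished; same asymptotic class, so both still grow ~n^2).

-- ===== PORT A =====

-- Python list assignment xs[i] = v (negative index counts from the end); all uses below are in range
def pySetIdx (xs : List Int) (i : Int) (v : Int) : List Int :=
  if 0 ≤ i then xs.set i.toNat v else xs.set (xs.length - (-i).toNat) v

-- to_list(num, base, l); res[::-1] is PySem.List.slice? … (-1) = reverse (PySem.List.slice?_none_none_neg_one)
def toListPy (num : Int) (base : Int) (l : Int) : List Int :=
  (((PySem.List.pyRange 0 l 1).foldl
      (fun (st : List Int × Int) _ =>
        (st.1 ++ [PySem.Int.mod st.2 base], PySem.Int.floordiv st.2 base))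
      ([], num)).1).reverse

-- max_prefix(a, b): first i in range(len(a), -1, -1) with a[:i] == b[-i:], else 0
def maxPrefixPy (pat : List Int) (s : List Int) : Int :=
  match (PySem.List.pyRange (pat.length : Int) (-1) (-1)).find?
      (fun i => PySem.List.slice pat none (some i) == PySem.List.slice s (some (-i)) none) with
  | some i => i
  | none => 0

-- the two nested loops that fill lookup[i][j][k]: Python preallocates [None]*base and assigns every
-- k = 0..base-1 in order; ported as the in-order build of the same row, threading the mutated res
def e3Lookup (da db : List Int) (l base : Int) : List (List (List (Int × Int))) :=
  (PySem.List.pyRange 0 2 1).map (fun i =>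
    (PySem.List.pyRange 0 (l+1) 1).map (fun j =>
      ((PySem.List.pyRange 0 base 1).foldl
        (fun (st : List Int × List (Int × Int)) k =>
          (pySetIdx st.1 (-1) k,
            st.2 ++ [if maxPrefixPy db (pySetIdx st.1 (-1) k) > maxPrefixPy da (pySetIdx st.1 (-1) k) then
              ((1:Int), maxPrefixPy db (pySetIdx st.1 (-1) k)) else ((0:Int), maxPrefixPy da (pySetIdx st.1 (-1) k))]))
        (PySem.List.slice (if i == 0 then da else db) none (some j) ++ [0], [])).2))

-- body of "for b in range(base): … for s in range(…): curr[i][j][s+n] += prev[i_][j_][s+n+o]"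
def e3Row (lookup : List (List (List (Int × Int)))) (prev : List (List (List Int)))
    (l n base : Int) (i j : Int) : List Int :=
  (PySem.List.pyRange 0 base 1).foldl
    (fun (arr : List Int) k =>
      let e := PySem.List.pyGetD (PySem.List.pyGetD (PySem.List.pyGetD lookup i []) j []) k (0, 0)
      let o : Int := if e.2 == l then PySem.List.pyGetD [(-1 : Int), 1] e.1 0 else 0
      (PySem.List.pyRange (max (-n) (-n - o)) (min n (n - o) + 1) 1).foldl
        (fun arr s =>
          pySetIdx arr (s + n)
            (PySem.List.pyGetD arr (s + n) 0 +
              PySem.List.pyGetD (PySem.List.pyGetD (PySem.List.pyGetD prev e.1 []) e.2 []) (s + n + o) 0))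
        arr)
    (List.replicate (2*n+1).toNat 0)

-- one pass of "for _ in range(1, n+1)": after 'curr, prev = prev, curr' the old curr is prev and
-- every row curr[i][j] is rebuilt from it
def e3Step (lookup : List (List (List (Int × Int)))) (l n base : Int)
    (cp : List (List (List Int)) × List (List (List Int))) :
    List (List (List Int)) × List (List (List Int)) :=
  let prev := cp.1
  ((PySem.List.pyRange 0 2 1).map (fun i =>
      (PySem.List.pyRange 0 (l+1) 1).map (fun j => e3Row lookup prev l n base i j)), prev)

def e3 (a : Int) (b : Int) (base : Int) (l : Int) (n : Int) : List Int :=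
  -- a = to_list(a, base, l); b = to_list(b, base, l)
  let da := toListPy a base l
  let db := toListPy b base l
  let lookup := e3Lookup da db l base
  -- prev / curr zero tables; curr[i][j][n] = 1
  let prev0 : List (List (List Int)) :=
    (PySem.List.pyRange 0 2 1).map (fun _ =>
      (PySem.List.pyRange 0 (l+1) 1).map (fun _ => List.replicate (2*n+1).toNat 0))
  let curr0 : List (List (List Int)) :=
    (PySem.List.pyRange 0 2 1).map (fun _ =>
      (PySem.List.pyRange 0 (l+1) 1).map (fun _ => pySetIdx (List.replicate (2*n+1).toNat 0) n 1))
  let cp := (PySem.List.pyRange 1 (n+1) 1).foldl (fun cp _ => e3Step lookup l n base cp) (curr0, prev0)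
  let c00 := PySem.List.pyGetD (PySem.List.pyGetD cp.1 0 []) 0 []
  [(PySem.List.slice c00 none (some n)).sum, PySem.List.pyGetD c00 n 0,
   (PySem.List.slice c00 (some (n+1)) none).sum]

-- ===== PORT B =====

-- step(i, j, k) of Source B: transition of the two-pattern matching automaton
def tstep (pa : List Int) (pb : List Int) (i : Int) (j : Int) (k : Int) : Int × Int :=
  let s := PySem.List.slice (if i == 0 then pa else pb) none (some j) ++ [k]
  let am := maxPrefixPy pa s
  let bm := maxPrefixPy pb s
  if bm > am then ((1:Int), bm) else ((0:Int), am)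

-- trans = [[[step(i, j, k) for k …] for j …] for i …]
def transTab (pa pb : List Int) (l base : Int) : List (List (List (Int × Int))) :=
  (PySem.List.pyRange 0 2 1).map (fun i =>
    (PySem.List.pyRange 0 (l+1) 1).map (fun j =>
      (PySem.List.pyRange 0 base 1).map (fun k => tstep pa pb i j k)))

-- body of "for _ in range(n)": push every (state, displacement) bucket through all base digits
def bStep (trans : List (List (List (Int × Int)))) (l base : Int)
    (dist : PySem.Dict (Int × Int × Int) Int) : PySem.Dict (Int × Int × Int) Int :=
  dist.items.foldl
    (fun (new : PySem.Dict (Int × Int × Int) Int) kv =>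
      (PySem.List.pyRange 0 base 1).foldl
        (fun new k =>
          let e := PySem.List.pyGetD (PySem.List.pyGetD (PySem.List.pyGetD trans kv.1.1 []) kv.1.2.1 []) k (0, 0)
          let o : Int := if e.2 == l then (if e.1 == 0 then -1 else 1) else 0
          let key := (e.1, e.2, kv.1.2.2 + o)
          new.insert key (new.getD key 0 + kv.2))
        new)
    PySem.Dict.empty

def e3_alt (a : Int) (b : Int) (base : Int) (l : Int) (n : Int) : List Int :=
  let pa := toListPy a base l
  let pb := toListPy b base l
  let trans := transTab pa pb l base
  let dist0 : PySem.Dict (Int × Int × Int) Int := PySem.Dict.empty.insert (0, 0, 0) 1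
  let dist := (PySem.List.pyRange 0 n 1).foldl (fun dist _ => bStep trans l base dist) dist0
  let pos := ((dist.items.filter (fun kv => decide (0 < kv.1.2.2))).map (·.2)).sum
  let zero := ((dist.items.filter (fun kv => decide (kv.1.2.2 = 0))).map (·.2)).sum
  let neg := ((dist.items.filter (fun kv => decide (kv.1.2.2 < 0))).map (·.2)).sum
  [pos, zero, neg]

-- ===== PRECONDITION & SPEC =====
-- Pre_ excludes exactly the inputs where the Python A raises: l < 0 or n < 0 (IndexError on an
-- empty table row) and base = 0 with l ≥ 1 (ZeroDivisionError in to_list).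
def Pre_e3 (a : Int) (b : Int) (base : Int) (l : Int) (n : Int) : Prop :=
  0 ≤ l ∧ 0 ≤ n ∧ (base = 0 → l = 0)
instance (a : Int) (b : Int) (base : Int) (l : Int) (n : Int) : Decidable (Pre_e3 a b base l n) := by
  unfold Pre_e3; infer_instance
def pvWitness_e3 : Int × Int × Int × Int × Int := (5, 7, 2, 2, 3)

def Spec_e3 (a : Int) (b : Int) (base : Int) (l : Int) (n : Int) (out : List Int) : Prop := out = e3_alt a b base l n
instance (a : Int) (b : Int) (base : Int) (l : Int) (n : Int) (out : List Int) : Decidable (Spec_e3 a b base l n out) := by unfold Spec_e3; infer_instance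

-- ===== CLAIM (what is proved, stated in full; the proofs are below) =====
def Claim_equal_e3 : Prop := ∀ (a : Int) (b : Int) (base : Int) (l : Int) (n : Int), Dom_e3 a b base l n → Pre_e3 a b base l n → Spec_e3 a b base l n (e3 a b base l n)

-- ===== LEMMAS AND PROOFS =====

-- ---- basic facts about the shared helpers ----

theorem length_toListPy (num base l : Int) : (toListPy num base l).length = l.toNat := by
  unfold toListPy
  rw [List.length_reverse]
  suffices h : ∀ (ks : List Int) (st : List Int × Int),
      ((ks.foldl (fun (st : List Int × Int) _ =>
        (st.1 ++ [PySem.Int.mod st.2 base], PySem.Int.floordiv st.2 base)) st).1).length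
      = st.1.length + ks.length by
    rw [h]
    by_cases hl : 0 < l
    · simp [PySem.List.pyRange, hl]
      try omega
    · have h0 : PySem.List.pyRange 0 l 1 = [] := by
        simp [PySem.List.pyRange]
        omega
      rw [h0]; simp; omega
  intro ks
  induction ks with
  | nil => simp
  | cons k ks ih => intro st; simp [ih]; omega

theorem maxPrefixPy_mem (pat s : List Int) :
    maxPrefixPy pat s = 0 ∨ maxPrefixPy pat s ∈ PySem.List.pyRange (pat.length : Int) (-1) (-1) := by
  unfold maxPrefixPy
  cases h : (PySem.List.pyRange (pat.length : Int) (-1) (-1)).find?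
      (fun i => PySem.List.slice pat none (some i) == PySem.List.slice s (some (-i)) none) with
  | none => left; rfl
  | some i => right; exact List.mem_of_find?_eq_some h

theorem mem_pyRange_down {a x : Int} (h : x ∈ PySem.List.pyRange a (-1) (-1)) : 0 ≤ x ∧ x ≤ a := by
  unfold PySem.List.pyRange at h
  simp at h
  split at h
  · obtain ⟨k, hk, he⟩ := h
    omega
  · simp at h

theorem maxPrefixPy_bounds (pat s : List Int) :
    0 ≤ maxPrefixPy pat s ∧ maxPrefixPy pat s ≤ (pat.length : Int) := by
  rcases maxPrefixPy_mem pat s with h | h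
  · rw [h]; exact ⟨le_refl 0, Int.natCast_nonneg _⟩
  · have := mem_pyRange_down h; omega

theorem tstep_fst (pa pb : List Int) (i j k : Int) :
    (tstep pa pb i j k).1 = 0 ∨ (tstep pa pb i j k).1 = 1 := by
  unfold tstep
  generalize (PySem.List.slice (if i == 0 then pa else pb) none (some j) ++ [k]) = s
  by_cases h : maxPrefixPy pa s < maxPrefixPy pb s <;> simp [h]

theorem tstep_snd (pa pb : List Int) (i j k : Int) :
    0 ≤ (tstep pa pb i j k).2 ∧
      ((tstep pa pb i j k).2 ≤ (pa.length : Int) ∨ (tstep pa pb i j k).2 ≤ (pb.length : Int)) := by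
  unfold tstep
  generalize hs : (PySem.List.slice (if i == 0 then pa else pb) none (some j) ++ [k]) = s
  have ha := maxPrefixPy_bounds pa s
  have hb := maxPrefixPy_bounds pb s
  by_cases h : maxPrefixPy pa s < maxPrefixPy pb s <;> simp [h] <;> omega

-- displacement per step, as a function of the transition's target
def offv (l : Int) (e : Int × Int) : Int := if e.2 = l then (if e.1 = 0 then -1 else 1) else 0

theorem offv_cases (l : Int) (e : Int × Int) : offv l e = -1 ∨ offv l e = 0 ∨ offv l e = 1 := by
  unfold offv
  by_cases h : e.2 = l <;> simp [h]
  by_cases h1 : e.1 = 0 <;> simp [h1]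

-- number of length-t digit strings that drive the automaton from (i, j) with total displacement d
def G (pa pb : List Int) (base l : Int) : Nat → Int → Int → Int → Int
  | 0, _, _, d => if d = 0 then 1 else 0
  | t+1, i, j, d => ((PySem.List.pyRange 0 base 1).map (fun k =>
      G pa pb base l t (tstep pa pb i j k).1 (tstep pa pb i j k).2 (d - offv l (tstep pa pb i j k)))).sum

theorem G_vanish (pa pb : List Int) (base l : Int) :
    ∀ (t : Nat) (i j d : Int), (d < -(t:Int) ∨ (t:Int) < d) → G pa pb base l t i j d = 0 := by
  intro t
  induction t with
  | zero => intro i j d h; unfold G; simp; omega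
  | succ t ih =>
    intro i j d h
    show ((PySem.List.pyRange 0 base 1).map _).sum = 0
    apply List.sum_eq_zero
    intro x hx
    obtain ⟨k, hk, rfl⟩ := List.mem_map.mp hx
    apply ih
    have := offv_cases l (tstep pa pb i j k)
    omega

-- ---- Python list mutation, read back ----

theorem pySetIdx_last (p : List Int) (x k : Int) : pySetIdx (p ++ [x]) (-1) k = p ++ [k] := by
  unfold pySetIdx
  simp

theorem length_pySetIdx (xs : List Int) (i v : Int) : (pySetIdx xs i v).length = xs.length := by
  unfold pySetIdx; split <;> simp

theorem getD_pySetIdx (xs : List Int) (i v : Int) (m : Nat) (hi : 0 ≤ i) (hm : m < xs.length) :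
    (pySetIdx xs i v).getD m 0 = if (m : Int) = i then v else xs.getD m 0 := by
  unfold pySetIdx
  rw [if_pos hi]
  by_cases h : (m : Int) = i
  · have : i.toNat = m := by omega
    subst this
    simp [List.getD_eq_getElem?_getD, hm, h]
  · have hne : i.toNat ≠ m := by omega
    simp [h, List.getD_eq_getElem?_getD, List.getElem?_set_ne hne]

-- ---- A's lookup table is B's trans table ----

theorem rowA_eq_map (da db : List Int) (i j : Int) (ks : List Int) :
    ∀ (p : List Int) (x : Int) (acc : List (Int × Int)),
      p = PySem.List.slice (if i == 0 then da else db) none (some j) →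
      (ks.foldl
        (fun (st : List Int × List (Int × Int)) k =>
          (pySetIdx st.1 (-1) k,
            st.2 ++ [if maxPrefixPy db (pySetIdx st.1 (-1) k) > maxPrefixPy da (pySetIdx st.1 (-1) k) then
              ((1:Int), maxPrefixPy db (pySetIdx st.1 (-1) k)) else ((0:Int), maxPrefixPy da (pySetIdx st.1 (-1) k))]))
        (p ++ [x], acc)).2 = acc ++ ks.map (fun k => tstep da db i j k) := by
  induction ks with
  | nil => intro p x acc hp; simp
  | cons k ks ih =>
    intro p x acc hp
    simp only [List.foldl_cons, pySetIdx_last]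
    rw [ih p k _ hp]
    subst hp
    simp [tstep]

theorem e3Lookup_eq_transTab (da db : List Int) (l base : Int) :
    e3Lookup da db l base = transTab da db l base := by
  unfold e3Lookup transTab
  apply List.map_congr_left; intro i _
  apply List.map_congr_left; intro j _
  rw [rowA_eq_map da db i j _ _ 0 [] rfl]
  simp

-- ---- generic scatter: a fold of "arr[pos u] += val u" read back pointwise ----

theorem foldl_setadd {β : Type} (pos : β → Int) (val : β → Int) (us : List β) :
    ∀ (arr : List Int), (∀ u ∈ us, 0 ≤ pos u ∧ pos u < (arr.length : Int)) →
      ((us.foldl (fun a u => pySetIdx a (pos u) (PySem.List.pyGetD a (pos u) 0 + val u)) arr).length = arr.length ∧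
       ∀ (m : Nat), m < arr.length →
        (us.foldl (fun a u => pySetIdx a (pos u) (PySem.List.pyGetD a (pos u) 0 + val u)) arr).getD m 0
          = arr.getD m 0 + ((us.filter (fun u => pos u == (m : Int))).map val).sum) := by
  induction us with
  | nil => intro arr h; simp
  | cons u us ih =>
    intro arr h
    have hu := h u (List.mem_cons_self)
    have harr' : (pySetIdx arr (pos u) (PySem.List.pyGetD arr (pos u) 0 + val u)).length = arr.length :=
      length_pySetIdx _ _ _
    have hrest : ∀ v ∈ us, 0 ≤ pos v ∧ pos v < ((pySetIdx arr (pos u) (PySem.List.pyGetD arr (pos u) 0 + val u)).length : Int) := by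
    
      intro v hv; rw [harr']; exact h v (List.mem_cons_of_mem _ hv)
    obtain ⟨ihlen, ihget⟩ := ih _ hrest
    constructor
    · simp only [List.foldl_cons]; rw [ihlen, harr']
    · intro m hm
      simp only [List.foldl_cons]
      rw [ihget m (by rw [harr']; exact hm)]
      rw [getD_pySetIdx _ _ _ _ hu.1 hm]
      by_cases hcase : (m : Int) = pos u
      · rw [if_pos hcase]
        have : PySem.List.pyGetD arr (pos u) 0 = arr.getD m 0 := by
          rw [PySem.List.pyGetD_of_nonneg _ _ hu.1]
          congr 1; omega
        rw [this]
        simp [hcase.symm]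
        ring
      · rw [if_neg hcase]
        have : (pos u == (m:Int)) = false := by simp; omega
        simp [this]

-- ---- small pyRange facts ----

theorem pyRange_length_zero (m : Int) : (PySem.List.pyRange 0 m 1).length = m.toNat := by
  have : m = ((m.toNat : Nat) : Int) ∨ m < 0 := by omega
  rcases this with h | h
  · rw [h, PySem.List.pyRange_zero_natCast]; simp; omega
  · have h0 : PySem.List.pyRange 0 m 1 = [] := by
      simp [PySem.List.pyRange]; omega
    rw [h0]; simp; omega

theorem pyGetD_map_pyRange' {β : Type} (f : Int → β) (m i : Int) (d : β) (h0 : 0 ≤ i) (h1 : i < m) :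
    PySem.List.pyGetD ((PySem.List.pyRange 0 m 1).map f) i d = f i := by
  have hm : m = ((m.toNat : Nat) : Int) := by omega
  have hi : i = ((i.toNat : Nat) : Int) := by omega
  rw [hm, hi, PySem.List.pyGetD_map_pyRange f m.toNat i.toNat d (by omega)]

theorem pyRange_nodup (a b : Int) : (PySem.List.pyRange a b 1).Nodup := by
  unfold PySem.List.pyRange
  simp only [one_ne_zero, if_false]
  split
  · apply List.Nodup.map _ (List.nodup_range)
    intro x y hxy
    simp at hxy
    omega
  · apply List.Nodup.map _ (List.nodup_range)
    intro x y hxy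
    simp at hxy
    omega

theorem pyRange_filter_shift (a b c x : Int) :
    (PySem.List.pyRange a b 1).filter (fun s => s + c == x)
      = if a ≤ x - c ∧ x - c < b then [x - c] else [] := by
  have h1 : (PySem.List.pyRange a b 1).filter (fun s => s + c == x)
      = (PySem.List.pyRange a b 1).filter (fun s => s == x - c) := by
    apply List.filter_congr
    intro s _
    simp; omega
  rw [h1]
  have h2 : ∀ (L : List Int), L.Nodup → L.filter (fun s => s == x - c)
      = if (x - c) ∈ L then [x - c] else [] := by
    intro L hL
    induction L with
    | nil => simp
    | cons y L ihL =>
      simp only [List.filter_cons]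
      rcases List.nodup_cons.mp hL with ⟨hy, hL'⟩
      by_cases hcase : y = x - c
      · subst hcase
        have hf : L.filter (fun s => s == x - c) = [] := by
          apply List.filter_eq_nil_iff.mpr
          intro s hs
          simp
          intro heq
          exact hy (heq ▸ hs)
        simp [hf]
      · have : (y == x - c) = false := by simp [hcase]
        rw [this]
        simp only [ihL hL', List.mem_cons]
        by_cases hm : x - c ∈ L <;> simp [hm, Ne.symm hcase]
  rw [h2 _ (pyRange_nodup a b)]
  by_cases hm : a ≤ x - c ∧ x - c < b
  · rw [if_pos (PySem.List.mem_pyRange_one.mpr hm), if_pos hm]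
  · rw [if_neg (fun hc => hm (PySem.List.mem_pyRange_one.mp hc)), if_neg hm]

-- ---- the table A maintains, in closed map form ----

def gtab (pa pb : List Int) (base l n : Int) (t : Nat) : List (List (List Int)) :=
  (PySem.List.pyRange 0 2 1).map (fun i =>
    (PySem.List.pyRange 0 (l+1) 1).map (fun j =>
      (PySem.List.pyRange 0 (2*n+1) 1).map (fun idx => G pa pb base l t i j (n - idx))))

theorem pyRange_zero_getElem (M : Int) (m : Nat) (h : m < (PySem.List.pyRange 0 M 1).length) :
    (PySem.List.pyRange 0 M 1)[m] = (m : Int) := by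
  have hL := pyRange_length_zero M
  have hM : M = ((M.toNat : Nat) : Int) := by rw [hL] at h; omega
  rw [List.getElem_eq_iff h]
  rw [hM, PySem.List.pyRange_zero_natCast]
  rw [hL] at h
  simp
  rw [List.getElem?_eq_getElem (by simpa using h)]
  simp

theorem gtab_read (pa pb : List Int) (base l n : Int) (t : Nat) (i j idx : Int)
    (hi : 0 ≤ i ∧ i < 2) (hj : 0 ≤ j ∧ j < l + 1) (hidx : 0 ≤ idx ∧ idx < 2*n+1) :
    PySem.List.pyGetD (PySem.List.pyGetD (PySem.List.pyGetD (gtab pa pb base l n t) i []) j []) idx 0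
      = G pa pb base l t i j (n - idx) := by
  unfold gtab
  rw [pyGetD_map_pyRange' _ 2 i _ hi.1 hi.2,
      pyGetD_map_pyRange' _ (l+1) j _ hj.1 hj.2,
      pyGetD_map_pyRange' _ (2*n+1) idx _ hidx.1 hidx.2]

theorem offA_eq (pa pb : List Int) (l i j k : Int) :
    (if (tstep pa pb i j k).2 == l then PySem.List.pyGetD [(-1 : Int), 1] (tstep pa pb i j k).1 0 else 0)
      = offv l (tstep pa pb i j k) := by
  rcases tstep_fst pa pb i j k with h | h <;>
    by_cases h2 : (tstep pa pb i j k).2 = l <;>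
      simp [offv, h, h2, PySem.List.pyGetD, PySem.List.pyGet?, PySem.List.pyIdx?]

theorem transTab_read (pa pb : List Int) (l base : Int) (i j k : Int)
    (hi : 0 ≤ i ∧ i < 2) (hj : 0 ≤ j ∧ j < l + 1) (hk : 0 ≤ k ∧ k < base) :
    PySem.List.pyGetD (PySem.List.pyGetD (PySem.List.pyGetD (transTab pa pb l base) i []) j []) k (0, 0)
      = tstep pa pb i j k := by
  unfold transTab
  rw [pyGetD_map_pyRange' _ 2 i _ hi.1 hi.2,
      pyGetD_map_pyRange' _ (l+1) j _ hj.1 hj.2,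
      pyGetD_map_pyRange' _ base k _ hk.1 hk.2]

theorem sum_map_flatMap {α β : Type} (g : α → List β) (l : List α) (v : β → Int) :
    ((l.flatMap g).map v).sum = (l.map (fun a => ((g a).map v).sum)).sum := by
  rw [List.map_flatMap, List.flatMap_def, List.sum_flatten, List.map_map]
  rfl

-- one rebuilt row of A's table, as the t+1 counts
theorem e3Row_eq (pa pb : List Int) (l base n : Int) (t : Nat)
    (hn : 0 ≤ n) (htn : (t : Int) ≤ n)
    (hpa : (pa.length : Int) = l) (hpb : (pb.length : Int) = l)
    (i j : Int) (hi : 0 ≤ i ∧ i < 2) (hj : 0 ≤ j ∧ j < l + 1) :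
    e3Row (transTab pa pb l base) (gtab pa pb base l n t) l n base i j
      = (PySem.List.pyRange 0 (2*n+1) 1).map (fun idx => G pa pb base l (t+1) i j (n - idx)) := by
  unfold e3Row
  rw [PySem.List.foldl_congr_mem _ _
    (fun (arr : List Int) k =>
      ((PySem.List.pyRange (max (-n) (-n - offv l (tstep pa pb i j k)))
          (min n (n - offv l (tstep pa pb i j k)) + 1) 1).map (fun s => (k, s))).foldl
        (fun arr (u : Int × Int) =>
          pySetIdx arr (u.2 + n)
            (PySem.List.pyGetD arr (u.2 + n) 0 +
              PySem.List.pyGetD (PySem.List.pyGetD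
                (PySem.List.pyGetD (gtab pa pb base l n t) (tstep pa pb i j u.1).1 [])
                (tstep pa pb i j u.1).2 []) (u.2 + n + offv l (tstep pa pb i j u.1)) 0))
        arr) _
    (by
      intro arr k hk
      have hkr := PySem.List.mem_pyRange_one.mp hk
      simp only [transTab_read pa pb l base i j k hi hj ⟨hkr.1, hkr.2⟩,
        offA_eq pa pb l i j k, List.foldl_map])]
  rw [← List.foldl_flatMap]
  have hbound : ∀ u ∈ (PySem.List.pyRange 0 base 1).flatMap
      (fun k => (PySem.List.pyRange (max (-n) (-n - offv l (tstep pa pb i j k)))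
        (min n (n - offv l (tstep pa pb i j k)) + 1) 1).map (fun s => (k, s))),
      0 ≤ u.2 + n ∧ u.2 + n < ((List.replicate (2*n+1).toNat (0:Int)).length : Int) := by
    intro u hu
    simp only [List.mem_flatMap, List.mem_map] at hu
    obtain ⟨k, hk, s, hs, rfl⟩ := hu
    have hsr := PySem.List.mem_pyRange_one.mp hs
    simp only [List.length_replicate]
    omega
  obtain ⟨hlen, hget⟩ := foldl_setadd (fun (u : Int × Int) => u.2 + n)
    (fun (u : Int × Int) =>
      PySem.List.pyGetD (PySem.List.pyGetD
        (PySem.List.pyGetD (gtab pa pb base l n t) (tstep pa pb i j u.1).1 [])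
        (tstep pa pb i j u.1).2 []) (u.2 + n + offv l (tstep pa pb i j u.1)) 0)
    _ (List.replicate (2*n+1).toNat 0) hbound
  apply List.ext_getElem
  · rw [hlen]
    simp
  · intro m h1 h2
    rw [← List.getD_eq_getElem _ 0 h1]
    rw [List.getElem_map, pyRange_zero_getElem]
    have hm : m < (List.replicate (2*n+1).toNat (0:Int)).length := by
      rw [hlen] at h1; exact h1
    rw [hget m hm]
    rw [List.getD_replicate _ (by simpa using hm)]
    rw [List.filter_flatMap, sum_map_flatMap]
    have hper : ∀ k ∈ PySem.List.pyRange 0 base 1,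
        ((((PySem.List.pyRange (max (-n) (-n - offv l (tstep pa pb i j k)))
            (min n (n - offv l (tstep pa pb i j k)) + 1) 1).map (fun s => (k, s))).filter
              (fun u => u.2 + n == (m : Int))).map
          (fun (u : Int × Int) =>
            PySem.List.pyGetD (PySem.List.pyGetD
              (PySem.List.pyGetD (gtab pa pb base l n t) (tstep pa pb i j u.1).1 [])
              (tstep pa pb i j u.1).2 []) (u.2 + n + offv l (tstep pa pb i j u.1)) 0)).sum
        = G pa pb base l t (tstep pa pb i j k).1 (tstep pa pb i j k).2
            ((n - (m : Int)) - offv l (tstep pa pb i j k)) := by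
      intro k hk
      rw [List.filter_map]
      have hcomp : ((fun (u : Int × Int) => u.2 + n == (m : Int)) ∘ (fun s => (k, s)))
          = (fun s => s + n == (m : Int)) := rfl
      rw [hcomp, pyRange_filter_shift]
      have hmr : m < (2*n+1).toNat := by simpa using hm
      by_cases hcond : max (-n) (-n - offv l (tstep pa pb i j k)) ≤ (m : Int) - n ∧
          (m : Int) - n < min n (n - offv l (tstep pa pb i j k)) + 1
      · rw [if_pos hcond]
        simp only [List.map_cons, List.map_nil, List.sum_cons, List.sum_nil, add_zero]
        have e1 := tstep_fst pa pb i j k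
        have e2 := tstep_snd pa pb i j k
        rw [gtab_read pa pb base l n t _ _ _ (by omega) (by omega) (by omega)]
        congr 1
        ring
      · rw [if_neg hcond]
        simp only [List.map_nil, List.sum_nil]
        rw [G_vanish]
        have := offv_cases l (tstep pa pb i j k)
        omega
    rw [List.map_congr_left hper, zero_add]
    simp only [G]


-- ---- A's main loop in closed form ----

theorem e3Step_eq (pa pb : List Int) (l base n : Int) (t : Nat)
    (hn : 0 ≤ n) (htn : (t : Int) ≤ n)
    (hpa : (pa.length : Int) = l) (hpb : (pb.length : Int) = l)
    (P : List (List (List Int))) :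
    e3Step (transTab pa pb l base) l n base (gtab pa pb base l n t, P)
      = (gtab pa pb base l n (t+1), gtab pa pb base l n t) := by
  unfold e3Step
  dsimp only
  refine Prod.ext ?_ rfl
  dsimp only
  apply List.map_congr_left
  intro i hi
  apply List.map_congr_left
  intro j hj
  exact e3Row_eq pa pb l base n t hn htn hpa hpb i j
    (PySem.List.mem_pyRange_one.mp hi) (PySem.List.mem_pyRange_one.mp hj)

theorem curr0_eq (pa pb : List Int) (base l n : Int) (hn : 0 ≤ n) :
    (PySem.List.pyRange 0 2 1).map (fun _ =>
      (PySem.List.pyRange 0 (l+1) 1).map (fun _ => pySetIdx (List.replicate (2*n+1).toNat 0) n 1))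
    = gtab pa pb base l n 0 := by
  unfold gtab
  apply List.map_congr_left; intro i _
  apply List.map_congr_left; intro j _
  apply List.ext_getElem
  · simp [length_pySetIdx]
  · intro m h1 h2
    have hm : m < (2*n+1).toNat := by simpa [length_pySetIdx] using h1
    rw [← List.getD_eq_getElem _ 0 h1, List.getElem_map, pyRange_zero_getElem]
    rw [getD_pySetIdx _ _ _ _ hn (by simpa using hm)]
    show _ = G pa pb base l 0 i j (n - (m:Int))
    unfold G
    by_cases hc : (m : Int) = n
    · rw [if_pos hc, if_pos (by omega)]
    · rw [if_neg hc, if_neg (by omega), List.getD_replicate _ hm]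

theorem foldl_const {γ α : Type} (F : γ → γ) (L : List α) :
    ∀ (init : γ), L.foldl (fun st _ => F st) init = F^[L.length] init := by
  induction L with
  | nil => intro init; simp
  | cons x L ih =>
    intro init
    simp only [List.foldl_cons, List.length_cons, ih, Function.iterate_succ]
    rfl

theorem loopA (pa pb : List Int) (l base n : Int)
    (hn : 0 ≤ n) (hpa : (pa.length : Int) = l) (hpb : (pb.length : Int) = l) :
    ∀ (m : Nat), (m : Int) ≤ n → ∀ (P : List (List (List Int))),
      ((fun cp => e3Step (transTab pa pb l base) l n base cp)^[m] (gtab pa pb base l n 0, P)).1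
        = gtab pa pb base l n m := by
  intro m
  induction m with
  | zero => intro _ P; rfl
  | succ m ih =>
    intro hm P
    rw [Function.iterate_succ_apply']
    have h1 := ih (by omega) P
    generalize hX : (fun cp => e3Step (transTab pa pb l base) l n base cp)^[m] (gtab pa pb base l n 0, P) = x at h1 ⊢
    calc (e3Step (transTab pa pb l base) l n base x).1
        = (e3Step (transTab pa pb l base) l n base (gtab pa pb base l n m, x.2)).1 := by
          unfold e3Step
          dsimp only
          rw [h1]
      _ = gtab pa pb base l n (m + 1) := by
          exact congrArg Prod.fst (e3Step_eq pa pb l base n m hn (by omega) hpa hpb x.2)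

theorem pyRange_length_one (a b : Int) : (PySem.List.pyRange a b 1).length = (b - a).toNat := by
  by_cases h : a < b
  · simp [PySem.List.pyRange, h]
    try omega
  · have h0 : PySem.List.pyRange a b 1 = [] := by
      simp [PySem.List.pyRange]
      omega
    rw [h0]; simp; omega

-- reindexing a reflected sum
theorem sum_pyRange_reflect (f : Int → Int) (c : Int) :
    ∀ (k : Nat) (a : Int),
      ((PySem.List.pyRange a (a + k) 1).map (fun s => f (c - s))).sum
        = ((PySem.List.pyRange (c - (a + k) + 1) (c - a + 1) 1).map f).sum := by
  intro k
  induction k with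
  | zero =>
    intro a
    have hempty : ∀ x : Int, PySem.List.pyRange x x 1 = [] := by
      intro x; simp [PySem.List.pyRange]
    push_cast
    rw [add_zero, hempty, hempty]
    rfl
  | succ k ih =>
    intro a
    push_cast
    have hlt : a < a + ((k : Int) + 1) := by omega
    rw [PySem.List.pyRange_one_cons hlt]
    rw [show a + ((k : Int) + 1) = a + 1 + (k : Int) from by ring]
    rw [show c - a + 1 = (c - (a + 1) + 1) + 1 from by ring]
    rw [PySem.List.pyRange_one_succ_right (by omega)]
    simp only [List.map_cons, List.sum_cons, List.map_append, List.sum_append,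
      List.map_nil, List.sum_nil]
    rw [ih (a + 1)]
    rw [show c - (a + 1) + 1 = c - a from by ring]
    ring

-- ---- what A returns, in closed form ----

theorem e3_characterization (a b base l n : Int)
    (hl : 0 ≤ l) (hn : 0 ≤ n) :
    e3 a b base l n =
      [((PySem.List.pyRange 1 (n+1) 1).map
          (fun X => G (toListPy a base l) (toListPy b base l) base l n.toNat 0 0 X)).sum,
       G (toListPy a base l) (toListPy b base l) base l n.toNat 0 0 0,
       ((PySem.List.pyRange (-n) 0 1).map
          (fun X => G (toListPy a base l) (toListPy b base l) base l n.toNat 0 0 X)).sum] := by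
  have hpa : (((toListPy a base l).length : Nat) : Int) = l := by
    rw [length_toListPy]; omega
  have hpb : (((toListPy b base l).length : Nat) : Int) = l := by
    rw [length_toListPy]; omega
  unfold e3
  dsimp only
  rw [e3Lookup_eq_transTab]
  rw [foldl_const (fun cp => e3Step (transTab (toListPy a base l) (toListPy b base l) l base) l n base cp)]
  rw [curr0_eq (toListPy a base l) (toListPy b base l) base l n hn]
  rw [pyRange_length_one]
  rw [loopA (toListPy a base l) (toListPy b base l) l base n hn hpa hpb
    ((n + 1 - 1).toNat) (by omega)]
  have hc : PySem.List.pyGetD (PySem.List.pyGetD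
      (gtab (toListPy a base l) (toListPy b base l) base l n ((n + 1 - 1).toNat)) 0 []) 0 []
      = (PySem.List.pyRange 0 (2*n+1) 1).map
          (fun idx => G (toListPy a base l) (toListPy b base l) base l ((n + 1 - 1).toNat) 0 0 (n - idx)) := by
    unfold gtab
    rw [pyGetD_map_pyRange' _ 2 0 _ (le_refl 0) (by omega),
        pyGetD_map_pyRange' _ (l+1) 0 _ (le_refl 0) (by omega)]
  rw [hc]
  have hN : (n + 1 - 1).toNat = n.toNat := by omega
  rw [hN]
  have hsplit1 : PySem.List.pyRange 0 (2*n+1) 1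
      = PySem.List.pyRange 0 n 1 ++ PySem.List.pyRange n (2*n+1) 1 :=
    PySem.List.pyRange_one_append 0 n (2*n+1) hn (by omega)
  have hsplit2 : PySem.List.pyRange 0 (2*n+1) 1
      = PySem.List.pyRange 0 (n+1) 1 ++ PySem.List.pyRange (n+1) (2*n+1) 1 :=
    PySem.List.pyRange_one_append 0 (n+1) (2*n+1) (by omega) (by omega)
  congr 1
  -- first bucket
  · rw [PySem.List.slice_to _ hn, hsplit1, List.map_append,
      List.take_left' (by rw [List.length_map, pyRange_length_one]; omega)]
    have hr := sum_pyRange_reflect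
      (fun X => G (toListPy a base l) (toListPy b base l) base l n.toNat 0 0 X) n n.toNat 0
    rw [show (0:Int) + (n.toNat : Int) = n by omega] at hr
    rw [hr]
    rw [show n - n + 1 = 1 by ring, show n - 0 + 1 = n + 1 by ring]
  congr 1
  -- middle bucket
  · rw [pyGetD_map_pyRange' _ (2*n+1) n _ hn (by omega), sub_self]
  congr 1
  -- last bucket
  · rw [PySem.List.slice_from _ (by omega : (0:Int) ≤ n+1), hsplit2, List.map_append,
      List.drop_left' (by rw [List.length_map, pyRange_length_one]; omega)]
    have hr := sum_pyRange_reflect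
      (fun X => G (toListPy a base l) (toListPy b base l) base l n.toNat 0 0 X) n n.toNat (n+1)
    rw [show (n:Int) + 1 + (n.toNat : Int) = 2*n+1 by omega] at hr
    rw [hr]
    rw [show n - (2*n+1) + 1 = -n by ring, show n - (n+1) + 1 = 0 by ring]

-- ---- weighted sums over a PySem.Dict ----

def wsum (g : Int × Int × Int → Int) (d : PySem.Dict (Int × Int × Int) Int) : Int :=
  (d.items.map (fun kv => kv.2 * g kv.1)).sum

theorem insert_items_cons (p : (Int × Int × Int) × Int) (rest : List ((Int × Int × Int) × Int))
    (k : Int × Int × Int) (v : Int) (hpk : (p.1 == k) = false) :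
    (PySem.Dict.insert ⟨p :: rest⟩ k v).items = p :: (PySem.Dict.insert ⟨rest⟩ k v).items := by
  unfold PySem.Dict.insert PySem.Dict.contains
  simp only [List.any_cons, hpk, Bool.false_or]
  by_cases h : rest.any (fun q => q.1 == k)
  · simp [h]
    intro h'
    exact absurd h' (by simpa using hpk)
  · simp [h]

theorem getD_cons_ne (p : (Int × Int × Int) × Int) (rest : List ((Int × Int × Int) × Int))
    (k : Int × Int × Int) (hpk : (p.1 == k) = false) :
    (PySem.Dict.mk (p :: rest)).getD k 0 = (PySem.Dict.mk rest).getD k 0 := by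
  unfold PySem.Dict.getD PySem.Dict.get?
  simp only [List.find?_cons, hpk]

theorem wsumList_insert (g : Int × Int × Int → Int) (k : Int × Int × Int) (v : Int) :
    ∀ (its : List ((Int × Int × Int) × Int)), (its.map (·.1)).Nodup →
      ((PySem.Dict.insert ⟨its⟩ k v).items.map (fun kv => kv.2 * g kv.1)).sum
        = (its.map (fun kv => kv.2 * g kv.1)).sum
          - ((PySem.Dict.mk its).getD k 0) * g k + v * g k := by
  intro its
  induction its with
  | nil =>
    intro _
    show ((PySem.Dict.insert ⟨[]⟩ k v).items.map _).sum = _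
    unfold PySem.Dict.insert PySem.Dict.contains PySem.Dict.getD PySem.Dict.get?
    simp
  | cons p rest ih =>
    intro hnd
    have h0 : (List.map (fun x => x.1) (p :: rest)).Nodup := hnd
    rw [List.map_cons] at h0
    rcases List.nodup_cons.mp h0 with ⟨hp, hrest⟩
    by_cases hpk : (p.1 == k) = true
    · have hk : p.1 = k := by simpa using hpk
      have hcont : (PySem.Dict.contains ⟨p :: rest⟩ k) = true := by
        unfold PySem.Dict.contains
        simp only [List.any_cons, hpk, Bool.true_or]
      have hrepl : rest.map (fun q => if (q.1 == k) = true then (k, v) else q) = rest := by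
        apply (List.map_congr_left ?_).trans (List.map_id rest)
        intro q hq
        have hq' : (q.1 == k) = false := by
          simp only [beq_eq_false_iff_ne, ne_eq]
          intro hqk
          rw [← hk] at hqk
          exact hp (List.mem_map.mpr ⟨q, hq, hqk⟩)
        simp [hq']
      have hgd : (PySem.Dict.mk (p :: rest)).getD k 0 = p.2 := by
        unfold PySem.Dict.getD PySem.Dict.get?
        simp only [List.find?_cons, hpk]
        rfl
      show ((PySem.Dict.insert ⟨p :: rest⟩ k v).items.map _).sum = _
      unfold PySem.Dict.insert
      rw [if_pos hcont]
      simp only [List.map_cons, hpk, if_true, hrepl, List.sum_cons, hgd]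
      rw [hk]
      ring
    · have hpk' : (p.1 == k) = false := by simpa using hpk
      rw [insert_items_cons p rest k v hpk', getD_cons_ne p rest k hpk']
      simp only [List.map_cons, List.sum_cons]
      rw [ih hrest]
      ring

theorem keys_nodup_insert (d : PySem.Dict (Int × Int × Int) Int) (k : Int × Int × Int) (v : Int)
    (hnd : d.keys.Nodup) : (d.insert k v).keys.Nodup := by
  have h := PySem.Dict.nodup_keys_foldl_insert_key [v] (fun _ => k) (fun _ x => x) d hnd
  simpa using h

theorem wsum_insert_add (g : Int × Int × Int → Int) (d : PySem.Dict (Int × Int × Int) Int)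
    (k : Int × Int × Int) (c : Int) (hnd : d.keys.Nodup) :
    wsum g (d.insert k (d.getD k 0 + c)) = wsum g d + c * g k := by
  obtain ⟨its⟩ := d
  unfold wsum
  rw [wsumList_insert g k _ its (by simpa [PySem.Dict.keys] using hnd)]
  ring

theorem wsum_foldl_insert (g : Int × Int × Int → Int) (us : List ((Int × Int × Int) × Int)) :
    ∀ (d : PySem.Dict (Int × Int × Int) Int), d.keys.Nodup →
      wsum g (us.foldl (fun new u => new.insert u.1 (new.getD u.1 0 + u.2)) d)
        = wsum g d + (us.map (fun u => u.2 * g u.1)).sum := by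
  induction us with
  | nil => intro d _; simp
  | cons u us ih =>
    intro d hnd
    simp only [List.foldl_cons, List.map_cons, List.sum_cons]
    rw [ih _ (keys_nodup_insert d u.1 _ hnd), wsum_insert_add g d u.1 u.2 hnd]
    ring

-- ---- sum bookkeeping ----

theorem sum_map_filter {α : Type} (p : α → Bool) (f : α → Int) (l : List α) :
    ((l.filter p).map f).sum = (l.map (fun x => if p x then f x else 0)).sum := by
  induction l with
  | nil => rfl
  | cons x l ih =>
    by_cases h : p x <;> simp [h, ih]

theorem sum_swap {α β : Type} (f : α → β → Int) (l1 : List α) (l2 : List β) :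
    (l1.map (fun x => (l2.map (fun y => f x y)).sum)).sum
      = (l2.map (fun y => (l1.map (fun x => f x y)).sum)).sum := by
  induction l1 with
  | nil => simp
  | cons x l1 ih =>
    simp only [List.map_cons, List.sum_cons, ih]
    rw [← List.sum_map_add]

theorem sum_indicator_pyRange (d c : Int) :
    ∀ (k : Nat) (lo : Int),
      ((PySem.List.pyRange lo (lo + k) 1).map (fun X => c * (if X - d = 0 then (1:Int) else 0))).sum
        = if lo ≤ d ∧ d < lo + k then c else 0 := by
  intro k
  induction k with
  | zero =>
    intro lo
    have hempty : ∀ x : Int, PySem.List.pyRange x x 1 = [] := by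
      intro x; simp [PySem.List.pyRange]
    push_cast
    rw [add_zero, hempty]
    simp only [List.map_nil, List.sum_nil]
    rw [if_neg (by omega)]
  | succ k ih =>
    intro lo
    push_cast
    have hlt : lo < lo + ((k : Int) + 1) := by omega
    rw [PySem.List.pyRange_one_cons hlt]
    simp only [List.map_cons, List.sum_cons]
    rw [show lo + ((k : Int) + 1) = lo + 1 + (k : Int) from by ring]
    rw [ih (lo + 1)]
    by_cases h1 : lo - d = 0 <;> by_cases h2 : lo + 1 ≤ d ∧ d < lo + 1 + (k:Int)
    · omega
    · rw [if_pos h1, if_neg h2, if_pos (by omega)]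
      ring
    · rw [if_neg h1, if_pos h2, if_pos (by omega)]
      ring
    · rw [if_neg h1, if_neg h2, if_neg (by omega)]
      ring

-- ---- B's loop in closed form ----

theorem offB_eq (pa pb : List Int) (l i j k : Int) :
    (if (tstep pa pb i j k).2 == l then (if (tstep pa pb i j k).1 == 0 then (-1:Int) else 1) else 0)
      = offv l (tstep pa pb i j k) := by
  by_cases h2 : (tstep pa pb i j k).2 = l <;> by_cases h1 : (tstep pa pb i j k).1 = 0 <;>
    simp [offv, h1, h2]

theorem bStep_eq (pa pb : List Int) (l base : Int) (dist : PySem.Dict (Int × Int × Int) Int)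
    (hitems : ∀ kv ∈ dist.items, (0 ≤ kv.1.1 ∧ kv.1.1 < 2) ∧ (0 ≤ kv.1.2.1 ∧ kv.1.2.1 < l + 1)) :
    bStep (transTab pa pb l base) l base dist
      = (dist.items.flatMap (fun kv => (PySem.List.pyRange 0 base 1).map
          (fun k => (((tstep pa pb kv.1.1 kv.1.2.1 k).1, (tstep pa pb kv.1.1 kv.1.2.1 k).2,
                      kv.1.2.2 + offv l (tstep pa pb kv.1.1 kv.1.2.1 k)), kv.2)))).foldl
          (fun new u => new.insert u.1 (new.getD u.1 0 + u.2)) PySem.Dict.empty := by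
  unfold bStep
  rw [PySem.List.foldl_congr_mem _ _
    (fun (new : PySem.Dict (Int × Int × Int) Int) kv =>
      ((PySem.List.pyRange 0 base 1).map
          (fun k => (((tstep pa pb kv.1.1 kv.1.2.1 k).1, (tstep pa pb kv.1.1 kv.1.2.1 k).2,
                      kv.1.2.2 + offv l (tstep pa pb kv.1.1 kv.1.2.1 k)), kv.2))).foldl
        (fun new u => new.insert u.1 (new.getD u.1 0 + u.2)) new) _
    (by
      intro new kv hkv
      have hb := hitems kv hkv
      dsimp only
      conv_rhs => rw [List.foldl_map]
      apply PySem.List.foldl_congr_mem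
      intro acc k hk
      have hkr := PySem.List.mem_pyRange_one.mp hk
      simp only [transTab_read pa pb l base _ _ k hb.1 hb.2 ⟨hkr.1, hkr.2⟩,
        offB_eq pa pb l kv.1.1 kv.1.2.1 k])]
  rw [← List.foldl_flatMap]

-- shape of every key reachable after t forward steps
def keyOK (l : Int) (t : Nat) (key : Int × Int × Int) : Prop :=
  (key.1 = 0 ∨ key.1 = 1) ∧ 0 ≤ key.2.1 ∧ key.2.1 ≤ l ∧ -(t:Int) ≤ key.2.2 ∧ key.2.2 ≤ (t:Int)

theorem bStep_keys (pa pb : List Int) (l base : Int) (t : Nat)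
    (hpa : ((pa.length : Nat) : Int) = l) (hpb : ((pb.length : Nat) : Int) = l)
    (dist : PySem.Dict (Int × Int × Int) Int)
    (hk : ∀ kv ∈ dist.items, keyOK l t kv.1) :
    ∀ kv ∈ (bStep (transTab pa pb l base) l base dist).items, keyOK l (t+1) kv.1 := by
  have hitems : ∀ kv ∈ dist.items, (0 ≤ kv.1.1 ∧ kv.1.1 < 2) ∧ (0 ≤ kv.1.2.1 ∧ kv.1.2.1 < l + 1) := by
    intro kv hkv
    have := hk kv hkv
    unfold keyOK at this
    constructor <;> constructor <;> omega
  rw [bStep_eq pa pb l base dist hitems]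
  intro kv hkv
  have hmem : kv.1 ∈ (List.foldl (fun new u => new.insert u.1 (new.getD u.1 0 + u.2))
      PySem.Dict.empty (dist.items.flatMap (fun kv => (PySem.List.pyRange 0 base 1).map
        (fun k => (((tstep pa pb kv.1.1 kv.1.2.1 k).1, (tstep pa pb kv.1.1 kv.1.2.1 k).2,
                    kv.1.2.2 + offv l (tstep pa pb kv.1.1 kv.1.2.1 k)), kv.2))))).keys :=
    List.mem_map.mpr ⟨kv, hkv, rfl⟩
  simp only [PySem.Dict.keys_foldl_insert_key] at hmem
  rcases (PySem.Set.mem_update _ _ _).mp hmem with hmem0 | hmem1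
  · exact absurd hmem0 (by simp [PySem.Dict.empty, PySem.Dict.keys])
  · rw [List.map_flatMap] at hmem1
    obtain ⟨kv', hkv', hin⟩ := List.mem_flatMap.mp hmem1
    rw [List.map_map] at hin
    obtain ⟨k, hkmem, hkey⟩ := List.mem_map.mp hin
    simp only [Function.comp_apply] at hkey
    have hold := hk kv' hkv'
    unfold keyOK at hold ⊢
    rw [← hkey]
    have h1 := tstep_fst pa pb kv'.1.1 kv'.1.2.1 k
    have h2 := tstep_snd pa pb kv'.1.1 kv'.1.2.1 k
    have h3 := offv_cases l (tstep pa pb kv'.1.1 kv'.1.2.1 k)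
    refine ⟨h1, ?_, ?_, ?_, ?_⟩ <;> push_cast <;> omega

theorem dist0_items :
    (PySem.Dict.empty.insert ((0:Int), (0:Int), (0:Int)) 1).items = [(((0:Int), (0:Int), (0:Int)), (1:Int))] := by
  rfl

theorem empty_keys_nodup : (PySem.Dict.empty (κ := Int × Int × Int) (ν := Int)).keys.Nodup := by
  simp [PySem.Dict.empty, PySem.Dict.keys]

theorem loopB (pa pb : List Int) (l base n : Int)
    (hl : 0 ≤ l) (hn : 0 ≤ n)
    (hpa : ((pa.length : Nat) : Int) = l) (hpb : ((pb.length : Nat) : Int) = l) :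
    ∀ (m : Nat), (m : Int) ≤ n →
      (∀ kv ∈ ((fun dist => bStep (transTab pa pb l base) l base dist)^[m]
          (PySem.Dict.empty.insert ((0:Int), (0:Int), (0:Int)) 1)).items, keyOK l m kv.1)
      ∧ ((fun dist => bStep (transTab pa pb l base) l base dist)^[m]
          (PySem.Dict.empty.insert ((0:Int), (0:Int), (0:Int)) 1)).keys.Nodup
      ∧ ∀ X : Int, wsum (fun key => G pa pb base l (n.toNat - m) key.1 key.2.1 (X - key.2.2))
          ((fun dist => bStep (transTab pa pb l base) l base dist)^[m]
            (PySem.Dict.empty.insert ((0:Int), (0:Int), (0:Int)) 1))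
          = G pa pb base l n.toNat 0 0 X := by
  intro m
  induction m with
  | zero =>
    intro _
    refine ⟨?_, ?_, ?_⟩
    · intro kv hkv
      rw [Function.iterate_zero_apply, dist0_items] at hkv
      rcases List.mem_singleton.mp hkv with rfl
      unfold keyOK
      dsimp only
      exact ⟨Or.inl rfl, le_refl 0, hl, by omega, by omega⟩
    · rw [Function.iterate_zero_apply]
      show ([(((0:Int), (0:Int), (0:Int)), (1:Int))].map (·.1)).Nodup
      simp
    · intro X
      rw [Function.iterate_zero_apply]
      unfold wsum
      rw [dist0_items]
      simp
  | succ m ih =>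
    intro hm
    obtain ⟨hK, hND, hW⟩ := ih (by omega)
    rw [Function.iterate_succ_apply']
    have hitems : ∀ kv ∈ ((fun dist => bStep (transTab pa pb l base) l base dist)^[m]
        (PySem.Dict.empty.insert ((0:Int), (0:Int), (0:Int)) 1)).items,
        (0 ≤ kv.1.1 ∧ kv.1.1 < 2) ∧ (0 ≤ kv.1.2.1 ∧ kv.1.2.1 < l + 1) := by
      intro kv hkv
      have := hK kv hkv
      unfold keyOK at this
      constructor <;> constructor <;> omega
    refine ⟨bStep_keys pa pb l base m hpa hpb _ hK, ?_, ?_⟩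
    · rw [bStep_eq pa pb l base _ hitems]
      exact PySem.Dict.nodup_keys_foldl_insert_key _ _ _ _ empty_keys_nodup
    · intro X
      rw [bStep_eq pa pb l base _ hitems]
      rw [wsum_foldl_insert _ _ _ empty_keys_nodup]
      have hz : wsum (fun key => G pa pb base l (n.toNat - (m+1)) key.1 key.2.1 (X - key.2.2))
          PySem.Dict.empty = 0 := by
        unfold wsum
        rfl
      rw [hz, zero_add]
      rw [sum_map_flatMap]
      have hper : ∀ kv ∈ ((fun dist => bStep (transTab pa pb l base) l base dist)^[m]
          (PySem.Dict.empty.insert ((0:Int), (0:Int), (0:Int)) 1)).items,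
          (((PySem.List.pyRange 0 base 1).map
            (fun k => (((tstep pa pb kv.1.1 kv.1.2.1 k).1, (tstep pa pb kv.1.1 kv.1.2.1 k).2,
                        kv.1.2.2 + offv l (tstep pa pb kv.1.1 kv.1.2.1 k)), kv.2))).map
            (fun u => u.2 * G pa pb base l (n.toNat - (m+1)) u.1.1 u.1.2.1 (X - u.1.2.2))).sum
          = kv.2 * G pa pb base l (n.toNat - m) kv.1.1 kv.1.2.1 (X - kv.1.2.2) := by
        intro kv _
        rw [List.map_map]
        have hstep : n.toNat - m = (n.toNat - (m+1)) + 1 := by omega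
        rw [hstep]
        show _ = kv.2 * ((PySem.List.pyRange 0 base 1).map _).sum
        rw [← List.sum_map_mul_left]
        apply congrArg
        apply List.map_congr_left
        intro k _
        simp only [Function.comp_apply]
        rw [sub_add_eq_sub_sub]
      rw [List.map_congr_left hper]
      exact hW X

theorem e3_alt_characterization (a b base l n : Int) (hl : 0 ≤ l) (hn : 0 ≤ n) :
    e3_alt a b base l n =
      [((PySem.List.pyRange 1 (n+1) 1).map
          (fun X => G (toListPy a base l) (toListPy b base l) base l n.toNat 0 0 X)).sum,
       G (toListPy a base l) (toListPy b base l) base l n.toNat 0 0 0,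
       ((PySem.List.pyRange (-n) 0 1).map
          (fun X => G (toListPy a base l) (toListPy b base l) base l n.toNat 0 0 X)).sum] := by
  have hpa : (((toListPy a base l).length : Nat) : Int) = l := by
    rw [length_toListPy]; omega
  have hpb : (((toListPy b base l).length : Nat) : Int) = l := by
    rw [length_toListPy]; omega
  unfold e3_alt
  dsimp only
  rw [foldl_const (fun dist =>
    bStep (transTab (toListPy a base l) (toListPy b base l) l base) l base dist)]
  rw [pyRange_length_zero]
  obtain ⟨hK, hND, hW⟩ := loopB (toListPy a base l) (toListPy b base l) l base n hl hn hpa hpb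
    n.toNat (by omega)
  have hGX : ∀ X : Int, G (toListPy a base l) (toListPy b base l) base l n.toNat 0 0 X
      = (((fun dist => bStep (transTab (toListPy a base l) (toListPy b base l) l base) l base dist)^[n.toNat]
          (PySem.Dict.empty.insert ((0:Int), (0:Int), (0:Int)) 1)).items.map
          (fun kv => kv.2 * (if X - kv.1.2.2 = 0 then (1:Int) else 0))).sum := by
    intro X
    rw [← hW X]
    unfold wsum
    apply congrArg
    apply List.map_congr_left
    intro kv _
    rw [Nat.sub_self]
    simp only [G]
  congr 1
  · -- positive bucket
    have hr1 : PySem.List.pyRange 1 (n+1) 1 = PySem.List.pyRange 1 (1 + (n.toNat : Int)) 1 := by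
      rw [show (1:Int) + (n.toNat : Int) = n + 1 from by omega]
    rw [hr1, sum_map_filter]
    rw [List.map_congr_left (fun X _ => hGX X)]
    rw [sum_swap (fun X (kv : (Int × Int × Int) × Int) =>
      kv.2 * (if X - kv.1.2.2 = 0 then (1:Int) else 0))]
    apply congrArg
    apply List.map_congr_left
    intro kv hkv
    have hb := hK kv hkv
    unfold keyOK at hb
    rw [sum_indicator_pyRange kv.1.2.2 kv.2 n.toNat 1]
    by_cases h : 0 < kv.1.2.2
    · rw [if_pos (by simpa using h), if_pos (by omega)]
    · rw [if_neg (by simpa using h), if_neg (by omega)]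
  congr 1
  · -- zero bucket
    rw [sum_map_filter, hGX 0]
    apply congrArg
    apply List.map_congr_left
    intro kv _
    by_cases h : kv.1.2.2 = 0
    · rw [if_pos (by simpa using h), if_pos (by omega)]
      ring
    · rw [if_neg (by simpa using h), if_neg (by omega)]
      ring
  congr 1
  · -- negative bucket
    have hr3 : PySem.List.pyRange (-n) 0 1 = PySem.List.pyRange (-n) (-n + (n.toNat : Int)) 1 := by
      rw [show -n + (n.toNat : Int) = 0 from by omega]
    rw [hr3, sum_map_filter]
    rw [List.map_congr_left (fun X _ => hGX X)]
    rw [sum_swap (fun X (kv : (Int × Int × Int) × Int) =>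
      kv.2 * (if X - kv.1.2.2 = 0 then (1:Int) else 0))]
    apply congrArg
    apply List.map_congr_left
    intro kv hkv
    have hb := hK kv hkv
    unfold keyOK at hb
    rw [sum_indicator_pyRange kv.1.2.2 kv.2 n.toNat (-n)]
    by_cases h : kv.1.2.2 < 0
    · rw [if_pos (by simpa using h), if_pos (by omega)]
    · rw [if_neg (by simpa using h), if_neg (by omega)]

-- ===== VERDICT (by name: the statement is the Claim_ definition above) =====
theorem e3_spec : Claim_equal_e3 := by
  intro a b base l n _ hpre
  obtain ⟨hl, hn, -⟩ := hpre
  unfold Spec_e3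
  rw [e3_characterization a b base l n hl hn, e3_alt_characterization a b base l n hl hn]
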